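-- pv_equiv track=rewrite | github.com/sirak-m-haile/flask-tweet-bot | main.py | replace_mentions
-- ===== SOURCE A (Python) =====
-- def replace_mentions(tweet_text):
--     tokens = tweet_text.split()
--     updated_tokens = []
--     index = 0
--     for token in tokens:
--         if token[0] != '@':
--             updated_tokens.append(token)
--
--     return " ".join(updated_tokens).strip()
-- ===== SOURCE B (Python) =====
-- def replace_mentions(tweet_text):
--     # single char-level pass: build the result directly, no token list
--     out = []
--     cur = ''
--     for ch in tweet_text + ' ':
--         if ch.isspace():
--             if cur and cur[0] != '@':
--                 if out:
--                     out.append(' ')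
--                 out.append(cur)
--             cur = ''
--         else:
--             cur += ch
--     return ''.join(out)
-- ===== Notes on version B (the rewrite author's own statement) =====
-- stated objective: alternative
-- what changed: Replaced split-into-tokens / filter / join / strip with a single character-level scan that accumulates the current word and emits it (space-separated) unless it starts with '@', so no token list is ever built.
import Mathlib
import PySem

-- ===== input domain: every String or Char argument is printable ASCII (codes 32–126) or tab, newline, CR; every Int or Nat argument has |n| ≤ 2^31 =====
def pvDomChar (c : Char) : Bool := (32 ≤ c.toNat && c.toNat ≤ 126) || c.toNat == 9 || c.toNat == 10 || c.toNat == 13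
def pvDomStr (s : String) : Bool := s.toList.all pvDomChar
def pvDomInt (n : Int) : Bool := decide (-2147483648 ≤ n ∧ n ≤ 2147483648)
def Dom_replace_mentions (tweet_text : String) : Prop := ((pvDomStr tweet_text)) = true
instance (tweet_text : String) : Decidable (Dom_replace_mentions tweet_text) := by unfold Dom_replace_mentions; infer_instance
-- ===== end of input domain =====

-- B replaces split/filter/join/strip by a single character-level scan (objective: alternative, same cost).

-- ===== PORT A =====
def replace_mentions (tweet_text : String) : String :=
  let tokens := PySem.Str.split₀ tweet_text
  let updated_tokens := tokens.foldl
    (fun acc token => if PySem.Str.pyGet? token 0 ≠ some '@' then acc ++ [token] else acc) []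
  PySem.Str.strip (PySem.Str.join " " updated_tokens)

-- ===== PORT B =====
-- state = (output chars so far, current word); one step per character
def pvStepB : List Char × List Char → Char → List Char × List Char
  | (out, cur), c =>
    if PySem.Chars.isspace c then
      match cur with
      | [] => (out, [])
      | h :: _ =>
        if h ≠ '@' then ((if out.isEmpty then cur else out ++ ' ' :: cur), [])
        else (out, [])
    else (out, cur ++ [c])

def replace_mentions_alt (tweet_text : String) : String :=
  String.ofList ((tweet_text.toList ++ [' ']).foldl pvStepB ([], [])).1

-- ===== PRECONDITION & SPEC =====
def Spec_replace_mentions (tweet_text : String) (out : String) : Prop := out = replace_mentions_alt tweet_text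
instance (tweet_text : String) (out : String) : Decidable (Spec_replace_mentions tweet_text out) := by unfold Spec_replace_mentions; infer_instance

-- ===== CLAIM (what is proved, stated in full; the proofs are below) =====
def Claim_equal_replace_mentions : Prop := ∀ (tweet_text : String), Dom_replace_mentions tweet_text → Spec_replace_mentions tweet_text (replace_mentions tweet_text)

-- ===== LEMMAS AND PROOFS =====

-- the predicate A's filter applies, on the char-list side
def pvKeep (t : List Char) : Bool := decide (PySem.Chars.pyGet? t 0 ≠ some '@')

-- B's emission of a list of tokens, starting from already-emitted output `out`
def pvEmit (out : List Char) (L : List (List Char)) : List Char :=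
  L.foldl (fun o t => if o.isEmpty then t else o ++ ' ' :: t) out

-- a well-formed token: nonempty and free of whitespace
def pvGood (t : List Char) : Prop := t ≠ [] ∧ ∀ c ∈ t, PySem.Chars.isspace c = false

lemma pvKeep_cons (h : Char) (t : List Char) : pvKeep (h :: t) = decide (h ≠ '@') := by
  simp [pvKeep, PySem.Chars.pyGet?, PySem.List.pyGet?, PySem.List.pyIdx?]

lemma pvGo_acc (cs : List Char) : ∀ (cur : List Char) (acc : List (List Char)),
    PySem.Chars.split₀.go cs cur acc = acc.reverse ++ PySem.Chars.split₀.go cs cur [] := by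
  induction cs with
  | nil =>
    intro cur acc
    simp only [PySem.Chars.split₀.go]
    split <;> simp
  | cons c rest ih =>
    intro cur acc
    simp only [PySem.Chars.split₀.go]
    split
    · split
      · exact ih [] acc
      · rw [ih [] (cur.reverse :: acc), ih [] [cur.reverse]]
        simp
    · exact ih (c :: cur) acc

lemma pvMain (cs : List Char) : ∀ (out cur : List Char),
    ((cs ++ [' ']).foldl pvStepB (out, cur)).1
      = pvEmit out (List.filter pvKeep (PySem.Chars.split₀.go cs cur.reverse [])) := by
  induction cs with
  | nil =>
    intro out cur
    cases cur with
    | nil =>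
      simp [pvStepB, PySem.Chars.split₀.go, pvEmit,
        show PySem.Chars.isspace ' ' = true from rfl]
    | cons h t =>
      simp only [List.nil_append, List.foldl_cons, List.foldl_nil, pvStepB,
        PySem.Chars.split₀.go, show PySem.Chars.isspace ' ' = true from rfl, if_true]
      by_cases hat : h = '@'
      · simp [hat, pvKeep_cons, pvEmit]
      · simp [hat, pvKeep_cons, pvEmit]
  | cons c rest ih =>
    intro out cur
    simp only [List.cons_append, List.foldl_cons]
    by_cases hsp : PySem.Chars.isspace c = true
    · cases cur with
      | nil =>
        simp only [pvStepB, hsp, if_true]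
        rw [ih out []]
        simp only [PySem.Chars.split₀.go, hsp, if_true]
        simp
      | cons h t =>
        simp only [pvStepB, hsp, if_true]
        simp only [PySem.Chars.split₀.go, hsp, if_true]
        have hne : ((h :: t).reverse).isEmpty = false := by simp
        rw [hne]
        simp only [Bool.false_eq_true, if_false, List.reverse_reverse]
        rw [pvGo_acc rest [] [(h :: t)]]
        simp only [List.reverse_singleton, List.singleton_append, List.filter_cons, pvKeep_cons]
        by_cases hat : h = '@'
        · simp only [hat, ne_eq, not_true_eq_false, decide_false, Bool.false_eq_true, if_false]
          rw [ih _ []]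
          simp [pvEmit]
        · simp only [ne_eq, hat, not_false_eq_true, decide_true, if_true]
          rw [ih _ []]
          simp [pvEmit]
    · simp only [pvStepB, hsp, Bool.false_eq_true, if_false]
      rw [ih out (cur ++ [c])]
      simp [PySem.Chars.split₀.go, hsp]

lemma pvGo_good (cs : List Char) : ∀ (cur : List Char) (acc : List (List Char)),
    (∀ c ∈ cur, PySem.Chars.isspace c = false) → (∀ t ∈ acc, pvGood t) →
    ∀ t ∈ PySem.Chars.split₀.go cs cur acc, pvGood t := by
  induction cs with
  | nil =>
    intro cur acc hcur hacc t ht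
    simp only [PySem.Chars.split₀.go] at ht
    split at ht
    · exact hacc t (by simpa using ht)
    · rename_i hne
      rcases (by simpa using ht : t ∈ acc ∨ t = cur.reverse) with h | h
      · exact hacc t h
      · subst h
        refine ⟨by simpa using hne, fun c hc => hcur c (by simpa using hc)⟩
  | cons c rest ih =>
    intro cur acc hcur hacc t ht
    simp only [PySem.Chars.split₀.go] at ht
    split at ht
    · split at ht
      · exact ih [] acc (by simp) hacc t ht
      · rename_i hsp hne
        refine ih [] (cur.reverse :: acc) (by simp) ?_ t ht
        intro u hu
        rcases List.mem_cons.mp hu with h | h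
        · subst h
          refine ⟨by simpa using hne, fun d hd => hcur d (by simpa using hd)⟩
        · exact hacc u h
    · rename_i hsp
      refine ih (c :: cur) acc ?_ hacc t ht
      intro d hd
      rcases List.mem_cons.mp hd with h | h
      · subst h; simpa using hsp
      · exact hcur d h

lemma pvEmit_ne_nil (L : List (List Char)) : ∀ (out : List Char), out ≠ [] →
    pvEmit out L = out ++ L.flatMap (fun t => ' ' :: t) := by
  induction L with
  | nil => intro out _; simp [pvEmit]
  | cons y L ih =>
    intro out hout
    have h0 : out.isEmpty = false := List.isEmpty_eq_false_iff.mpr hout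
    simp only [pvEmit, List.foldl_cons, h0, Bool.false_eq_true, if_false]
    have hrec := ih (out ++ ' ' :: y) (by simp)
    simp only [pvEmit] at hrec
    rw [hrec]
    simp

lemma pvJoin_cons (x : List Char) (L : List (List Char)) :
    PySem.Chars.join [' '] (x :: L) = x ++ L.flatMap (fun t => ' ' :: t) := by
  induction L generalizing x with
  | nil => simp [PySem.Chars.join, List.intercalate]
  | cons y L ih =>
    have hstep : PySem.Chars.join [' '] (x :: y :: L)
        = x ++ [' '] ++ PySem.Chars.join [' '] (y :: L) := by
      simp [PySem.Chars.join, List.intercalate, List.intersperse]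
    rw [hstep, ih y]
    simp

lemma pvEmit_eq_join (L : List (List Char)) (hL : ∀ t ∈ L, t ≠ []) :
    pvEmit [] L = PySem.Chars.join [' '] L := by
  cases L with
  | nil => simp [pvEmit, PySem.Chars.join, List.intercalate]
  | cons x L =>
    have hx : x ≠ [] := hL x (by simp)
    rw [pvJoin_cons]
    simp only [pvEmit, List.foldl_cons, List.isEmpty_nil, if_true]
    exact pvEmit_ne_nil L x hx

lemma pvStrip_id (l : List Char)
    (hh : ∀ c, l.head? = some c → PySem.Chars.isspace c = false)
    (hl : ∀ c, l.getLast? = some c → PySem.Chars.isspace c = false) :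
    PySem.Chars.strip l = l := by
  cases l with
  | nil => rfl
  | cons h t =>
    have hh' : PySem.Chars.isspace h = false := hh h rfl
    cases hr : (h :: t).reverse with
    | nil => simp at hr
    | cons g gs =>
      have hg : (h :: t).getLast? = some g := by
        rw [← List.head?_reverse, hr]; rfl
      have hg' : PySem.Chars.isspace g = false := hl g hg
      simp only [PySem.Chars.strip, PySem.Chars.lstrip, PySem.Chars.rstrip]
      rw [List.dropWhile_cons_of_neg (by simp [hh']), hr,
        List.dropWhile_cons_of_neg (by simp [hg']), ← hr, List.reverse_reverse]

lemma pvLast_good (M : List (List Char)) : ∀ (x : List Char), x ≠ [] →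
    (∀ c, x.getLast? = some c → PySem.Chars.isspace c = false) →
    (∀ t ∈ M, pvGood t) →
    ∀ c, (x ++ M.flatMap (fun t => ' ' :: t)).getLast? = some c →
      PySem.Chars.isspace c = false := by
  induction M with
  | nil => intro x hx hxl _ c hc; simp at hc; exact hxl c hc
  | cons y M ih =>
    intro x hx hxl hM c hc
    have hy : pvGood y := hM y (by simp)
    have hsplit : x ++ ((y :: M).flatMap (fun t => ' ' :: t))
        = (x ++ ' ' :: y) ++ M.flatMap (fun t => ' ' :: t) := by simp
    rw [hsplit] at hc
    refine ih (x ++ ' ' :: y) (by simp) ?_ (fun t ht => hM t (by simp [ht])) c hc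
    intro d hd
    rw [List.getLast?_append_of_ne_nil x (by simp : (' ' :: y) ≠ [])] at hd
    have : (' ' :: y) = [' '] ++ y := rfl
    rw [this, List.getLast?_append_of_ne_nil [' '] hy.1] at hd
    exact hy.2 d (List.mem_of_getLast? hd)

lemma pvStrip_join (F : List (List Char)) (hF : ∀ t ∈ F, pvGood t) :
    PySem.Chars.strip (PySem.Chars.join [' '] F) = PySem.Chars.join [' '] F := by
  cases F with
  | nil => simp [PySem.Chars.join, List.intercalate]; rfl
  | cons x M =>
    have hx : pvGood x := hF x (by simp)
    rw [pvJoin_cons]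
    refine pvStrip_id _ ?_ ?_
    · intro d hd
      cases hxe : x with
      | nil => exact absurd hxe hx.1
      | cons h t =>
        subst hxe
        simp only [List.cons_append, List.head?_cons, Option.some.injEq] at hd
        subst hd
        exact hx.2 h (by simp)
    · exact pvLast_good M x hx.1
        (fun c hc => hx.2 c (List.mem_of_getLast? hc))
        (fun t ht => hF t (by simp [ht]))

theorem replace_mentions_spec : Claim_equal_replace_mentions := by
  intro s _
  show replace_mentions s = replace_mentions_alt s
  unfold replace_mentions replace_mentions_alt
  rw [pvMain s.toList [] []]
  simp only [List.reverse_nil]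
  -- A's loop is an append-if fold: turn it into a filter
  rw [PySem.List.foldl_append_ite_eq_filter]
  simp only [List.nil_append]
  -- move the filter through the String.ofList map
  have hfm : (List.map String.ofList (PySem.Chars.split₀ s.toList)).filter
        (fun token => decide (PySem.Str.pyGet? token 0 ≠ some '@'))
      = List.map String.ofList ((PySem.Chars.split₀ s.toList).filter pvKeep) := by
    rw [List.filter_map]
    refine congrArg (List.map String.ofList) (List.filter_congr ?_)
    intro t _
    simp [pvKeep, PySem.Str.pyGet?, PySem.Chars.pyGet?]
  have hT : ∀ t ∈ PySem.Chars.split₀ s.toList, pvGood t :=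
    pvGo_good s.toList [] [] (by simp) (by simp)
  have hF : ∀ t ∈ (PySem.Chars.split₀ s.toList).filter pvKeep, pvGood t :=
    fun t ht => hT t (List.mem_of_mem_filter ht)
  simp only [PySem.Str.split₀, PySem.Chars.split₀] at hfm ⊢
  rw [hfm]
  -- join and strip on the char-list side
  simp only [PySem.Str.join, PySem.Str.strip, List.map_map]
  have hmap : List.map (String.toList ∘ String.ofList)
      (List.filter pvKeep (PySem.Chars.split₀.go s.toList [] []))
      = List.filter pvKeep (PySem.Chars.split₀.go s.toList [] []) := by
    simp [Function.comp_def]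
  rw [hmap, String.toList_ofList, show (" ".toList : List Char) = [' '] from rfl]
  rw [pvStrip_join _ (by simp only [PySem.Chars.split₀] at hF; exact hF)]
  rw [pvEmit_eq_join _ (fun t ht =>
    ((by simp only [PySem.Chars.split₀] at hF; exact hF : ∀ t ∈ (PySem.Chars.split₀.go s.toList [] []).filter pvKeep, pvGood t) t ht).1)]
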